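-- pv_equiv track=rewrite | github.com/epilectrik/voynich | phases/01-09_early_hypothesis/phase23_regime_boundary_analysis.py | detect_2_cycles
-- ===== SOURCE A (Python) =====
-- from typing import Dict, List, Tuple, Optional, Set
--
-- def detect_2_cycles(tokens: List[str]) -> List[Tuple[int, int, str]]:
--     """Detect 2-cycles in token sequence. Returns (position, cycle_num, position_in_cycle)."""
--     cycles = []
--     cycle_num = 1
--     pos_in_cycle = 1
--
--     for i, token in enumerate(tokens):
--         cycles.append((i, cycle_num, f"{cycle_num}.{pos_in_cycle}"))
--         pos_in_cycle += 1
--         if pos_in_cycle > 2: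
--             pos_in_cycle = 1
--             cycle_num += 1
--
--     return cycles
-- ===== SOURCE B (Python) =====
-- def detect_2_cycles(tokens):
--     """Detect 2-cycles in token sequence. Returns (position, cycle_num, position_in_cycle)."""
--     return [(i, i // 2 + 1, f"{i // 2 + 1}.{i % 2 + 1}") for i in range(len(tokens))]
-- ===== Notes on version B (the rewrite author's own statement) =====
-- stated objective: simpler
-- what changed: Replaced the running cycle_num/pos_in_cycle counters and accumulator loop by a single comprehension computing each tuple in closed form from the index (i//2+1, i%2+1).
import Mathlib
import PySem

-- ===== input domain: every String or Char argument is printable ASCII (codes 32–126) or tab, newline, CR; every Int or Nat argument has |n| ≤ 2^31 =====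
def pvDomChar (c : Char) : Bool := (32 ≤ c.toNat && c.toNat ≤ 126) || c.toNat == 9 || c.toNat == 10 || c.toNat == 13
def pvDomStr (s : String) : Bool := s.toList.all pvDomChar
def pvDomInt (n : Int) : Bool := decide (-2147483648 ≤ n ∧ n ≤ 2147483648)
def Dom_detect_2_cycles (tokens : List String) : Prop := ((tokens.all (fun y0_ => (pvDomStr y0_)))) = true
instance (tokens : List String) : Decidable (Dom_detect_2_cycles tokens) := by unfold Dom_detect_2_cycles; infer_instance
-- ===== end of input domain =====

-- B replaces A's running cycle/position counters by closed-form index arithmetic (simpler).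

-- ===== PORT A =====
def detect_2_cycles (tokens : List String) : List (Int × Int × String) :=
  ((PySem.List.enumerate tokens 0).foldl
    (fun (st : List (Int × Int × String) × Int × Int) it =>
      let cycles := st.1 ++ [(it.1, st.2.1, PySem.Int.toStr st.2.1 ++ "." ++ PySem.Int.toStr st.2.2)]
      let pos_in_cycle := st.2.2 + 1
      if pos_in_cycle > 2 then (cycles, st.2.1 + 1, 1) else (cycles, st.2.1, pos_in_cycle))
    ([], 1, 1)).1

-- ===== PORT B =====
def detect_2_cycles_alt (tokens : List String) : List (Int × Int × String) :=
  (PySem.List.pyRange 0 (tokens.length : Int) 1).map (fun i =>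
    (i, PySem.Int.floordiv i 2 + 1,
     PySem.Int.toStr (PySem.Int.floordiv i 2 + 1) ++ "." ++ PySem.Int.toStr (PySem.Int.mod i 2 + 1)))

-- ===== PRECONDITION & SPEC =====
def Spec_detect_2_cycles (tokens : List String) (out : List (Int × Int × String)) : Prop := out = detect_2_cycles_alt tokens
instance (tokens : List String) (out : List (Int × Int × String)) : Decidable (Spec_detect_2_cycles tokens out) := by unfold Spec_detect_2_cycles; infer_instance

-- ===== CLAIM (what is proved, stated in full; the proofs are below) =====
def Claim_equal_detect_2_cycles : Prop := ∀ (tokens : List String), Dom_detect_2_cycles tokens → Spec_detect_2_cycles tokens (detect_2_cycles tokens)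

-- ===== LEMMAS AND PROOFS =====

-- loop invariant: after k tokens processed, the state counters are (k/2+1, k%2+1)
lemma detect_loop_eq (xs : List String) (k : Nat) (acc : List (Int × Int × String)) :
    ((PySem.List.enumerate xs (k : Int)).foldl
      (fun (st : List (Int × Int × String) × Int × Int) it =>
        let cycles := st.1 ++ [(it.1, st.2.1, PySem.Int.toStr st.2.1 ++ "." ++ PySem.Int.toStr st.2.2)]
        let pos_in_cycle := st.2.2 + 1
        if pos_in_cycle > 2 then (cycles, st.2.1 + 1, 1) else (cycles, st.2.1, pos_in_cycle))
      (acc, ((k / 2 : Nat) : Int) + 1, ((k % 2 : Nat) : Int) + 1)).1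
    = acc ++ (PySem.List.pyRange (k : Int) ((k : Int) + xs.length) 1).map (fun i =>
        (i, PySem.Int.floordiv i 2 + 1,
         PySem.Int.toStr (PySem.Int.floordiv i 2 + 1) ++ "." ++ PySem.Int.toStr (PySem.Int.mod i 2 + 1))) := by
  induction xs generalizing k acc with
  | nil =>
    simp [PySem.List.enumerate_nil, PySem.List.pyRange_one_eq_nil]
  | cons x xs ih =>
    rw [PySem.List.enumerate_cons, List.foldl_cons]
    have hk1 : ((k : Int) + 1) = ((k + 1 : Nat) : Int) := by push_cast; ring
    have hrange : PySem.List.pyRange (k : Int) ((k : Int) + (x :: xs).length) 1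
        = (k : Int) :: PySem.List.pyRange ((k : Int) + 1) ((k : Int) + (x :: xs).length) 1 := by
      apply PySem.List.pyRange_one_cons; simp
    have hb : ((k : Int) + ((x :: xs).length : Int)) = (k : Int) + 1 + (xs.length : Int) := by
      push_cast [List.length_cons]; ring
    rcases Nat.mod_two_eq_zero_or_one k with h | h
    · -- k even: pos_in_cycle goes 1 → 2, no reset
      have hcond : ¬ (((k % 2 : Nat) : Int) + 1 + 1 > 2) := by rw [h]; norm_num
      have := ih (k + 1) (acc ++ [((k : Int), ((k / 2 : Nat) : Int) + 1,
        PySem.Int.toStr (((k / 2 : Nat) : Int) + 1) ++ "." ++ PySem.Int.toStr (((k % 2 : Nat) : Int) + 1))])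
      rw [show (((k + 1) / 2 : Nat) : Int) = ((k / 2 : Nat) : Int) by omega,
          show (((k + 1) % 2 : Nat) : Int) + 1 = ((k % 2 : Nat) : Int) + 1 + 1 by omega,
          ← hk1] at this
      
      rw [if_neg hcond]
      rw [this, hrange, hb]
      simp
    · -- k odd: pos_in_cycle would exceed 2, reset and bump cycle_num
      have hcond : (((k % 2 : Nat) : Int) + 1 + 1 > 2) := by rw [h]; norm_num
      have := ih (k + 1) (acc ++ [((k : Int), ((k / 2 : Nat) : Int) + 1,
        PySem.Int.toStr (((k / 2 : Nat) : Int) + 1) ++ "." ++ PySem.Int.toStr (((k % 2 : Nat) : Int) + 1))])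
      rw [show (((k + 1) / 2 : Nat) : Int) = ((k / 2 : Nat) : Int) + 1 by omega,
          show (((k + 1) % 2 : Nat) : Int) + 1 = (1 : Int) by omega,
          ← hk1] at this
      rw [if_pos hcond]
      rw [this, hrange, hb]
      simp

-- ===== VERDICT (by name: the statement is the Claim_ definition above) =====
theorem detect_2_cycles_spec : Claim_equal_detect_2_cycles := by
  intro tokens _
  unfold Spec_detect_2_cycles detect_2_cycles detect_2_cycles_alt
  have h := detect_loop_eq tokens 0 []
  simpa using h
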